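-- pv_equiv track=rewrite | github.com/nguyenchiemminhvu/DSA | Problems/Leetcode/DeleteCharactersToMakeFancyString/solve.py | makeFancyString
-- ===== SOURCE A (Python) =====
-- def makeFancyString(s: str) -> str:
--     count = 0
--     res = []
--     prev = '#'
--     for c in s:
--         if c == prev:
--             count += 1
--         else:
--             count = 1
--
--         if count < 3:
--             res.append(c)
--         prev = c
--     return "".join(res)
-- ===== SOURCE B (Python) =====
-- def makeFancyString(s: str) -> str:
--     runs = []  # run-length encoding of s: [char, count] per maximal run
--     for c in s:
--         if runs and runs[-1][0] == c:
--             runs[-1][1] += 1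
--         else:
--             runs.append([c, 1])
--     return "".join(c * min(n, 2) for c, n in runs)
-- ===== Notes on version B (the rewrite author's own statement) =====
-- stated objective: alternative
-- what changed: B first run-length encodes the string into maximal (char,count) runs, then emits each run truncated to at most two copies, instead of A's single pass with a per-character running counter deciding keep/drop per position.
import Mathlib
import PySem

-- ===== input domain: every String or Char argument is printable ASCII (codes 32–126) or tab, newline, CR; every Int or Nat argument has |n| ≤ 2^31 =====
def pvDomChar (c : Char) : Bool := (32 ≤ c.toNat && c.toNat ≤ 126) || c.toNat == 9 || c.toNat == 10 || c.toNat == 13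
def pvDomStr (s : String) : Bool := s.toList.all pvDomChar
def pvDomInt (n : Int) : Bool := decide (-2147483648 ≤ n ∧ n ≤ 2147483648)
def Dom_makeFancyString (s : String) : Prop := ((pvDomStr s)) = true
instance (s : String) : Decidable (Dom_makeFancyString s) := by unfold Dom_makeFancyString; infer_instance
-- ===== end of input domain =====

-- B replaces A's per-character running counter by run-length encoding followed by
-- emitting each maximal run truncated to at most two copies (alternative decomposition).


-- ===== PORT A =====
-- literal port of A: one pass with state (count, res, prev), prev initialised to '#'
def makeFancyString (s : String) : String :=
  let r := s.toList.foldl (fun (st : Int × List Char × Char) c =>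
      let count := if c = st.2.2 then st.1 + 1 else 1
      let res := if count < 3 then st.2.1 ++ [c] else st.2.1
      (count, res, c))
    (0, ([] : List Char), '#')
  String.mk r.2.1

-- ===== PORT B =====
-- literal port of B: build the run-length encoding (mutating the last run ↦ dropLast ++ [..]),
-- then emit each run capped at two copies
def makeFancyString_alt (s : String) : String :=
  let runs := s.toList.foldl (fun (runs : List (Char × Nat)) c =>
      match runs.getLast? with
      | some (d, n) => if d = c then runs.dropLast ++ [(d, n + 1)] else runs ++ [(c, 1)]
      | none => [(c, 1)]) ([] : List (Char × Nat))
  String.mk (runs.flatMap (fun p => List.replicate (min p.2 2) p.1))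

-- ===== PRECONDITION & SPEC =====
def Spec_makeFancyString (s : String) (out : String) : Prop := out = makeFancyString_alt s
instance (s : String) (out : String) : Decidable (Spec_makeFancyString s out) := by unfold Spec_makeFancyString; infer_instance

-- ===== CLAIM (what is proved, stated in full; the proofs are below) =====
def Claim_equal_makeFancyString : Prop := ∀ (s : String), Dom_makeFancyString s → Spec_makeFancyString s (makeFancyString s)

-- ===== LEMMAS AND PROOFS =====

-- purified recursion of A's loop body
def gA : List Char → Char → Int → List Char
  | [], _, _ => []
  | c :: l, prev, count =>
    (if (if c = prev then count + 1 else 1) < 3 then [c] else []) ++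
      gA l c (if c = prev then count + 1 else 1)

-- run-length consumption with an open run (c, n)
def consume : List Char → Char → Nat → List (Char × Nat)
  | [], c, n => [(c, n)]
  | c' :: l, c, n => if c' = c then consume l c (n + 1) else (c, n) :: consume l c' 1

def emitRuns (rs : List (Char × Nat)) : List Char :=
  rs.flatMap (fun p => List.replicate (min p.2 2) p.1)

theorem gA_foldl (l : List Char) (count : Int) (res : List Char) (prev : Char) :
    (l.foldl (fun (st : Int × List Char × Char) c =>
      let count := if c = st.2.2 then st.1 + 1 else 1
      let res := if count < 3 then st.2.1 ++ [c] else st.2.1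
      (count, res, c)) (count, res, prev)).2.1 = res ++ gA l prev count := by
  induction l generalizing count res prev with
  | nil => simp [gA]
  | cons c l ih =>
    simp only [List.foldl_cons, gA]
    rw [ih]
    by_cases h : c = prev <;> simp [h] <;> split <;> simp

theorem consume_foldl (l : List Char) (runs : List (Char × Nat)) (d : Char) (n : Nat) :
    (l.foldl (fun (runs : List (Char × Nat)) c =>
      match runs.getLast? with
      | some (d, n) => if d = c then runs.dropLast ++ [(d, n + 1)] else runs ++ [(c, 1)]
      | none => [(c, 1)]) (runs ++ [(d, n)])) = runs ++ consume l d n := by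
  induction l generalizing runs d n with
  | nil => simp [consume]
  | cons c l ih =>
    simp only [List.foldl_cons, List.getLast?_concat, List.dropLast_concat]
    by_cases h : d = c
    · subst h
      rw [if_pos rfl, ih]
      simp [consume]
    · rw [if_neg h, List.append_assoc, ← List.singleton_append,
        ← List.append_assoc, ih]
      have hc : ¬ c = d := fun hh => h hh.symm
      simp [consume, hc]

theorem main_lemma (l : List Char) (c : Char) (n : Nat) (count : Int)
    (hn : 0 < n) (hmin : min count 2 = min (n : Int) 2) :
    List.replicate (min n 2) c ++ gA l c count = emitRuns (consume l c n) := by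
  induction l generalizing c n count with
  | nil => simp [gA, consume, emitRuns]
  | cons c' l ih =>
    by_cases h : c' = c
    · subst h
      show List.replicate (min n 2) c' ++
          ((if (if c' = c' then count + 1 else 1) < 3 then [c'] else []) ++
            gA l c' (if c' = c' then count + 1 else 1)) =
          emitRuns (if c' = c' then consume l c' (n + 1) else (c', n) :: consume l c' 1)
      simp only [eq_self_iff_true, if_true]
      rw [← ih c' (n + 1) (count + 1) (by omega) (by omega), ← List.append_assoc]
      congr 1
      split
      · rw [show [c'] = List.replicate 1 c' from rfl, ← List.replicate_add]
        congr 1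
        omega
      · rw [List.append_nil]
        congr 1
        omega
    · show List.replicate (min n 2) c ++
          ((if (if c' = c then count + 1 else 1) < 3 then [c'] else []) ++
            gA l c' (if c' = c then count + 1 else 1)) =
          emitRuns (if c' = c then consume l c (n + 1) else (c, n) :: consume l c' 1)
      simp only [if_neg h, emitRuns, List.flatMap_cons]
      have hih := ih c' 1 1 (by omega) (by omega)
      simp only [emitRuns] at hih
      norm_num at hih
      rw [← hih]
      norm_num

-- ===== VERDICT (by name: the statement is the Claim_ definition above) =====
theorem makeFancyString_spec : Claim_equal_makeFancyString := by
  intro s _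
  unfold Spec_makeFancyString makeFancyString makeFancyString_alt
  cases hl : s.toList with
  | nil => simp
  | cons c l =>
    simp only [List.foldl_cons]
    rw [gA_foldl]
    have h1 : (if c = '#' then (0 : Int) + 1 else 1) = 1 := by split <;> omega
    rw [h1]
    have h2 : (if (1 : Int) < 3 then ([] : List Char) ++ [c] else []) = [c] := by norm_num
    rw [h2]
    simp only [List.getLast?_nil]
    rw [show ([(c, 1)] : List (Char × Nat)) = [] ++ [(c, 1)] from (List.nil_append _).symm,
      consume_foldl]
    have := main_lemma l c 1 1 (by omega) (by omega)
    simp only [List.nil_append, emitRuns] at this ⊢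
    rw [← this]
    simp
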